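-- pv_equiv track=rewrite | github.com/samuelweller21/SAAT | lib/utils.py | standard_g
-- ===== SOURCE A (Python) =====
-- import math
--
-- def standard_g(n, size):
--         #Strategy: Assign groups of size g or g+1, if that fails reduce group size by 1 and try again
--
--         # Begin by trying to maximise the number of groups of size g i.e. a in a*g + b*(g+1) = n
--         a = math.floor(n/size)
--
--         # Then decrease a until a sufficient b is found
--         b = 0
--         # If a goes negative try a smaller group size (won't affect large n, small size)
--         while(a >= 0):
--             if (a*size + b*(size+1)) == n:
--                 return [size,a,b]
--             elif (a*size + b*(size+1)) > n:
--                 a = a - 1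
--                 b = 0
--             else:
--                 b = b + 1
--         else:
--             return standard_g(n, size-1)
-- ===== SOURCE B (Python) =====
-- def standard_g(n, size):
--     # Closed-form per group size: the largest a <= n//s with a === -n (mod s+1)
--     # solves a*s + b*(s+1) = n with b = (n - a*s)//(s+1); try the next smaller
--     # size only when that a is negative.  O(1) per size level instead of A's
--     # quadratic scan.
--     s = size
--     while s > 1:
--         q = n // s
--         a = q - (q + n) % (s + 1)
--         if a >= 0:
--             return [s, a, (n - a * s) // (s + 1)]
--         s -= 1
--     return [1, n, 0]
-- ===== Notes on version B (the rewrite author's own statement) =====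
-- stated objective: faster
-- what changed: Instead of decrementing a from n//size and re-climbing b from 0 at every step, B solves each size level in closed form: the largest a <= n//s with a congruent to -n mod (s+1) is a = n//s - (n//s + n) % (s+1), giving b = (n - a*s)//(s+1) directly, recursing to s-1 only when that a is negative.
-- outside the precondition, e.g. on standard_g(0, -3): A returns [-3, 0, 0], B returns [1, 0, 0]; on standard_g(-2, -1): A returns [-1, 2, 0], B returns [1, -2, 0]
import Mathlib
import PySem

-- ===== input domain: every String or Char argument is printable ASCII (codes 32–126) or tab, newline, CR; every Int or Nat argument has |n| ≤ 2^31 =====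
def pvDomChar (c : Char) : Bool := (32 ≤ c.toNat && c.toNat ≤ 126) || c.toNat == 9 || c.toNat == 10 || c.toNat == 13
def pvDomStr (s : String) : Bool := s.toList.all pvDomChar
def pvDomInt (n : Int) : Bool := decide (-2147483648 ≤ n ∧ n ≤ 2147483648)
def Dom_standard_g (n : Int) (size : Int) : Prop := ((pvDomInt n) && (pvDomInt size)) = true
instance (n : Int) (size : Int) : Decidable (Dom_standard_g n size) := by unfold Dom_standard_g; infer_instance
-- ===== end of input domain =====

-- B replaces A's inner decrement-a / re-climb-b scan by a closed-form modular solution of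
-- a*s + b*(s+1) = n per size level (measured faster at the large sizes).

-- ===== PORT A =====
-- Inner while-loop of A over state (a, b); fueled so the definition is total.
-- Result: none = fuel exhausted (never reached on Pre_); some none = loop exited with
-- a < 0 (Python's while/else branch, fall through to the recursive call);
-- some (some r) = an explicit `return [size, a, b]`.
def pvALoop (n s : Int) : Nat → Int → Int → Option (Option (List Int))
  | 0, _, _ => none
  | f + 1, a, b =>
    if 0 ≤ a then
      if a * s + b * (s + 1) = n then some (some [s, a, b])
      else if a * s + b * (s + 1) > n then pvALoop n s f (a - 1) 0
      else pvALoop n s f a (b + 1)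
    else some none

-- Outer recursion of A on size, fueled.  `math.floor(n/size)` is exact integer floor
-- division for the |n| ≤ 2^31 inputs of Dom_ and is ported as PySem.Int.floordiv;
-- size = 0 is Python's ZeroDivisionError (none here, excluded by Pre_).
def pvAFuel (n : Int) : Nat → Int → Option (List Int)
  | 0, _ => none
  | f + 1, s =>
    if s = 0 then none
    else
      match pvALoop n s ((n.toNat + 2) * (n.toNat + 2)) (PySem.Int.floordiv n s) 0 with
      | some (some r) => some r
      | some none => pvAFuel n f (s - 1)
      | none => none

def standard_g (n : Int) (size : Int) : List Int :=
  (pvAFuel n (size.toNat + 1) size).getD []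

-- ===== PORT B =====
-- B's while-loop: s decreases while 1 < s, so recursion on (s-1).toNat terminates.
def pvBLoop (n : Int) (s : Int) : List Int :=
  if 1 < s then
    let q := PySem.Int.floordiv n s
    let a := q - PySem.Int.mod (q + n) (s + 1)
    if 0 ≤ a then [s, a, PySem.Int.floordiv (n - a * s) (s + 1)]
    else pvBLoop n (s - 1)
  else [1, n, 0]
termination_by (s - 1).toNat
decreasing_by simp_wf; omega

def standard_g_alt (n : Int) (size : Int) : List Int := pvBLoop n size

-- ===== PRECONDITION & SPEC =====
-- Pre_ restricts to the natural domain n ≥ 0, size ≥ 1.  Outside it A almost always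
-- raises (ZeroDivisionError at size = 0, RecursionError for n < 0 or size < 0), and on
-- the few negative-size inputs where the blind recursion does return, the value (a
-- negative group size) is an accident of the implementation.
def Pre_standard_g (n : Int) (size : Int) : Prop := 1 ≤ size ∧ 0 ≤ n
instance (n : Int) (size : Int) : Decidable (Pre_standard_g n size) := by
  unfold Pre_standard_g; infer_instance

def pvWitness_standard_g : Int × Int := (10, 3)

def Spec_standard_g (n : Int) (size : Int) (out : List Int) : Prop := out = standard_g_alt n size
instance (n : Int) (size : Int) (out : List Int) : Decidable (Spec_standard_g n size out) := by
  unfold Spec_standard_g; infer_instance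

-- ===== CLAIM (what is proved, stated in full; the proofs are below) =====
def Claim_equal_standard_g : Prop := ∀ (n : Int) (size : Int), Dom_standard_g n size →
  Pre_standard_g n size → Spec_standard_g n size (standard_g n size)

-- ===== LEMMAS AND PROOFS =====

-- Mathematical shape of A's inner loop from (a, 0): scan a downward for the first a
-- with (s+1) | (n - a*s); none if a goes negative.  Proof-side helper only.
def pvR (n s : Int) (a : Int) : Option (List Int) :=
  if h : a < 0 then none
  else if (s + 1) ∣ (n - a * s) then some [s, a, (n - a * s) / (s + 1)]
  else pvR n s (a - 1)
termination_by (a + 1).toNat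
decreasing_by simp_wf; omega

-- pvR in closed form: the candidate is a - (a+n) % (s+1).
theorem pvR_char (n s : Int) (hs : 1 ≤ s) :
    ∀ m : Nat, ∀ a : Int, (a + 1).toNat ≤ m →
    pvR n s a =
      (if 0 ≤ a - (a + n) % (s + 1) then
        some [s, a - (a + n) % (s + 1), (n - (a - (a + n) % (s + 1)) * s) / (s + 1)]
      else none) := by
  intro m
  induction m with
  | zero =>
    intro a ha
    have hneg : a < 0 := by omega
    rw [pvR, dif_pos hneg]
    have hr0 : 0 ≤ (a + n) % (s + 1) := Int.emod_nonneg _ (by omega)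
    rw [if_neg (by omega)]
  | succ m IH =>
    intro a ha
    by_cases hneg : a < 0
    · rw [pvR, dif_pos hneg]
      have hr0 : 0 ≤ (a + n) % (s + 1) := Int.emod_nonneg _ (by omega)
      rw [if_neg (by omega)]
    · rw [pvR, dif_neg hneg]
      have hdvd_iff : (s + 1) ∣ (n - a * s) ↔ (s + 1) ∣ (a + n) := by
        constructor
        · intro ⟨k, hk⟩; exact ⟨k + a, by linarith [hk]⟩
        · intro ⟨k, hk⟩; exact ⟨k - a, by linarith [hk]⟩
      by_cases hd : (s + 1) ∣ (n - a * s)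
      · rw [if_pos hd]
        have hr : (a + n) % (s + 1) = 0 := Int.emod_eq_zero_of_dvd (hdvd_iff.mp hd)
        rw [hr]
        simp only [sub_zero]
        rw [if_pos (by omega)]
      · rw [if_neg hd]
        rw [IH (a - 1) (by omega)]
        have hr0 : 0 ≤ (a + n) % (s + 1) := Int.emod_nonneg _ (by omega)
        have hrne : (a + n) % (s + 1) ≠ 0 := by
          intro h0
          exact hd (hdvd_iff.mpr (Int.dvd_of_emod_eq_zero h0))
        have hlt : (a + n) % (s + 1) < s + 1 := Int.emod_lt_of_pos _ (by omega)
        have h1p : (1 : Int) % (s + 1) = 1 := Int.emod_eq_of_lt (by omega) (by omega)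
        have hstep : (a - 1 + n) % (s + 1) = (a + n) % (s + 1) - 1 := by
          have h2 : (a + n - 1) % (s + 1) = ((a + n) % (s + 1) - 1 % (s + 1)) % (s + 1) :=
            Int.sub_emod _ _ _
          rw [h1p] at h2
          have h3 : ((a + n) % (s + 1) - 1) % (s + 1) = (a + n) % (s + 1) - 1 :=
            Int.emod_eq_of_lt (by omega) (by omega)
          rw [h3] at h2
          calc (a - 1 + n) % (s + 1) = (a + n - 1) % (s + 1) := by ring_nf
            _ = (a + n) % (s + 1) - 1 := h2
        rw [hstep]
        have he : a - 1 - ((a + n) % (s + 1) - 1) = a - (a + n) % (s + 1) := by ring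
        rw [he]

-- A's inner loop computes pvR (given sufficient fuel), tracked by the measure
-- ((n+1)*a + (n-b)).toNat + 1.
theorem pvALoop_eq (n s : Int) (hs : 1 ≤ s) (hn : 0 ≤ n) :
    ∀ m : Nat, ∀ a b : Int, 0 ≤ a → 0 ≤ b → a * s + b * (s + 1) ≤ n →
    ((n + 1) * a + (n - b)).toNat + 1 ≤ m → ∀ f : Nat, m < f →
    pvALoop n s f a b =
      some (if (s + 1) ∣ (n - a * s - b * (s + 1)) then
              some [s, a, b + (n - a * s - b * (s + 1)) / (s + 1)]
            else pvR n s (a - 1)) := by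
  intro m
  induction m using Nat.strong_induction_on with
  | _ m IH =>
  intro a b ha hb hsum hM f hf
  obtain ⟨f, rfl⟩ : ∃ f', f = f' + 1 := ⟨f - 1, by omega⟩
  rw [pvALoop, if_pos ha]
  have hTnn : 0 ≤ (n + 1) * a := mul_nonneg (by omega) ha
  have hasnn : 0 ≤ a * s := mul_nonneg ha (by omega)
  have hbs2 : b * 2 ≤ b * (s + 1) := mul_le_mul_of_nonneg_left (by omega) hb
  have hbsnn : 0 ≤ b * (s + 1) := mul_nonneg hb (by omega)
  by_cases heq : a * s + b * (s + 1) = n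
  · rw [if_pos heq]
    have hz : n - a * s - b * (s + 1) = 0 := by omega
    rw [hz]
    simp
  · have hlt : a * s + b * (s + 1) < n := lt_of_le_of_ne hsum heq
    have hbn : b < n := by omega
    rw [if_neg heq, if_neg (by omega)]
    by_cases hov : a * s + (b + 1) * (s + 1) ≤ n
    · -- stays under n: one b-step, recurse
      have hb1 : (b + 1) * (s + 1) = b * (s + 1) + (s + 1) := by ring
      have key := IH (((n + 1) * a + (n - (b + 1))).toNat + 1) (by omega) a (b + 1) ha
        (by omega) hov (le_refl _) f (by omega)
      rw [key]
      have hdiff : n - a * s - (b + 1) * (s + 1) = n - a * s - b * (s + 1) - (s + 1) := by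
        omega
      have hdvd_iff : (s + 1) ∣ (n - a * s - (b + 1) * (s + 1)) ↔
          (s + 1) ∣ (n - a * s - b * (s + 1)) := by
        rw [hdiff]
        exact ⟨fun h => by have := dvd_add h (dvd_refl (s + 1)); simpa using this,
               fun h => dvd_sub h (dvd_refl (s + 1))⟩
      by_cases hd : (s + 1) ∣ (n - a * s - b * (s + 1))
      · rw [if_pos (hdvd_iff.mpr hd), if_pos hd]
        obtain ⟨k, hk⟩ := hd
        have e1 : n - a * s - (b + 1) * (s + 1) = (s + 1) * (k - 1) := by
          rw [hdiff, hk]; ring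
        have e2 : (n - a * s - b * (s + 1)) / (s + 1) = k := by
          rw [hk]; exact Int.mul_ediv_cancel_left k (by omega)
        have e3 : (n - a * s - (b + 1) * (s + 1)) / (s + 1) = k - 1 := by
          rw [e1]; exact Int.mul_ediv_cancel_left (k - 1) (by omega)
        rw [e2, e3]
        have : b + 1 + (k - 1) = b + k := by ring
        rw [this]
      · rw [if_neg (fun h => hd (hdvd_iff.mp h)), if_neg hd]
    · -- next b-step overshoots: unfold once more, then a decreases
      push Not at hov
      have hne2 : ¬ a * s + (b + 1) * (s + 1) = n := by omega
      have hMge : 1 ≤ (n - b).toNat := by omega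
      obtain ⟨g, rfl⟩ : ∃ g, f = g + 1 := ⟨f - 1, by omega⟩
      rw [pvALoop, if_pos ha, if_neg hne2, if_pos (by omega)]
      have hnd : ¬ (s + 1) ∣ (n - a * s - b * (s + 1)) := by
        intro hdv
        have hpos : 0 < n - a * s - b * (s + 1) := by omega
        have hb1 : (b + 1) * (s + 1) = b * (s + 1) + (s + 1) := by ring
        have := Int.le_of_dvd hpos hdv
        omega
      rw [if_neg hnd]
      by_cases hA : a - 1 < 0
      · -- a was 0: loop exits, pvR (a-1) = none
        obtain ⟨g2, rfl⟩ : ∃ g2, g = g2 + 1 := ⟨g - 1, by omega⟩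
        rw [pvALoop, if_neg (by omega), pvR, dif_pos hA]
      · -- a ≥ 1: apply IH at (a-1, 0)
        have hT1 : (n + 1) * (a - 1) = (n + 1) * a - (n + 1) := by ring
        have hTge : n + 1 ≤ (n + 1) * a := le_mul_of_one_le_right (by omega) (by omega)
        have hs1 : (a - 1) * s = a * s - s := by ring
        have key := IH (((n + 1) * (a - 1) + (n - 0)).toNat + 1) (by omega) (a - 1) 0
          (by omega) (le_refl 0) (by omega) (le_refl _) g (by omega)
        rw [key]
        conv_rhs => rw [pvR]
        rw [dif_neg hA]
        have e : n - (a - 1) * s - 0 * (s + 1) = n - (a - 1) * s := by ring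
        rw [e]
        by_cases hd2 : (s + 1) ∣ (n - (a - 1) * s)
        · rw [if_pos hd2, if_pos hd2]
          simp
        · rw [if_neg hd2, if_neg hd2]

-- The fueled outer recursion of A equals B's loop on the natural domain.
theorem pvAFuel_eq (n : Int) (hn : 0 ≤ n) :
    ∀ f : Nat, ∀ s : Int, 1 ≤ s → s.toNat < f → pvAFuel n f s = some (pvBLoop n s) := by
  intro f
  induction f with
  | zero => intro s hs hf; omega
  | succ f IH =>
    intro s hs hf
    rw [pvAFuel, if_neg (by omega : ¬ s = 0),
      PySem.Int.floordiv_eq_ediv_of_pos (by omega : (0:Int) < s)]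
    have ha0nn : 0 ≤ n / s := (Int.ediv_nonneg_iff_of_pos (by omega)).mpr hn
    have hmul : n / s * s ≤ n := Int.ediv_mul_le n (by omega)
    have hle : n / s ≤ n := Int.ediv_le_self s hn
    -- fuel bound for the inner loop
    have hbound : ((n + 1) * (n / s) + (n - 0)).toNat + 1 < (n.toNat + 2) * (n.toNat + 2) := by
      have h1 : (n + 1) * (n / s) ≤ (n + 1) * n := mul_le_mul_of_nonneg_left hle (by omega)
      have h2 : ((n + 1) * (n / s) + (n - 0)).toNat ≤ ((n + 1) * n + n).toNat :=
        Int.toNat_le_toNat (by omega)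
      have e : (n + 1) * n + n = (((n.toNat + 1) * n.toNat + n.toNat : Nat) : Int) := by
        push_cast [Int.toNat_of_nonneg hn]; ring
      have h3 : ((n + 1) * n + n).toNat = (n.toNat + 1) * n.toNat + n.toNat := by
        rw [e, Int.toNat_natCast]
      have h4 : (n.toNat + 1) * n.toNat + n.toNat + 1 < (n.toNat + 2) * (n.toNat + 2) := by
        nlinarith [Nat.zero_le n.toNat]
      omega
    have hinner := pvALoop_eq n s hs hn (((n + 1) * (n / s) + (n - 0)).toNat + 1) (n / s) 0
      ha0nn (le_refl 0) (by omega) (le_refl _) ((n.toNat + 2) * (n.toNat + 2)) hbound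
    have hR0 : (if (s + 1) ∣ (n - (n / s) * s - 0 * (s + 1)) then
          some [s, n / s, 0 + (n - (n / s) * s - 0 * (s + 1)) / (s + 1)]
        else pvR n s (n / s - 1)) = pvR n s (n / s) := by
      conv_rhs => rw [pvR]
      rw [dif_neg (by omega)]
      have e : n - (n / s) * s - 0 * (s + 1) = n - (n / s) * s := by ring
      rw [e]
      by_cases hd : (s + 1) ∣ (n - (n / s) * s)
      · rw [if_pos hd, if_pos hd]; simp
      · rw [if_neg hd, if_neg hd]
    rw [hR0] at hinner
    have hchar := pvR_char n s hs ((n / s + 1).toNat) (n / s) (le_refl _)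
    have hmodeq : PySem.Int.mod (n / s + n) (s + 1) = (n / s + n) % (s + 1) :=
      PySem.Int.mod_eq_emod_of_pos (by omega)
    have hrnn : 0 ≤ (n / s + n) % (s + 1) := Int.emod_nonneg _ (by omega)
    by_cases h0 : 0 ≤ n / s - (n / s + n) % (s + 1)
    · -- solution found at this size level
      rw [hchar, if_pos h0] at hinner
      rw [hinner]
      show some _ = some (pvBLoop n s)
      congr 1
      by_cases hs1 : 1 < s
      · rw [pvBLoop, if_pos hs1]
        simp only [PySem.Int.floordiv_eq_ediv_of_pos (by omega : (0:Int) < s), hmodeq,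
          PySem.Int.floordiv_eq_ediv_of_pos (by omega : (0:Int) < s + 1), if_pos h0]
      · -- s = 1: both sides are [1, n, 0]
        have hseq : s = 1 := by omega
        subst hseq
        rw [pvBLoop, if_neg (by omega)]
        have ha0 : n / 1 = n := Int.ediv_one n
        have hr : (n / 1 + n) % (1 + 1) = 0 := by
          rw [ha0]
          have : n + n = 2 * n := by ring
          rw [this]
          exact Int.mul_emod_right 2 n
        rw [ha0] at hr ⊢
        rw [hr]
        norm_num
    · -- no solution at this size level: A recurses to s - 1, and so does B
      rw [hchar, if_neg h0] at hinner
      rw [hinner]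
      have hs1 : 1 < s := by
        by_contra hc
        have hseq : s = 1 := by omega
        subst hseq
        have ha0 : n / 1 = n := Int.ediv_one n
        have hr : (n / 1 + n) % (1 + 1) = 0 := by
          rw [ha0]
          have : n + n = 2 * n := by ring
          rw [this]
          exact Int.mul_emod_right 2 n
        rw [ha0] at h0 hr
        rw [hr] at h0
        omega
      show pvAFuel n f (s - 1) = some (pvBLoop n s)
      rw [IH (s - 1) (by omega) (by omega)]
      congr 1
      conv_rhs => rw [pvBLoop]
      rw [if_pos hs1]
      simp only [PySem.Int.floordiv_eq_ediv_of_pos (by omega : (0:Int) < s), hmodeq, if_neg h0]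

-- ===== VERDICT (by name: the statement is the Claim_ definition above) =====
theorem standard_g_spec : Claim_equal_standard_g := by
  intro n size _ ⟨hs, hn⟩
  unfold Spec_standard_g standard_g standard_g_alt
  rw [pvAFuel_eq n hn (size.toNat + 1) size hs (by omega)]
  rfl
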